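-- pv_equiv track=rewrite | github.com/abhibp1993/prefltlf2pdfa | prefltlf2pdfa/semantics.py | semantics_forall_exists
-- ===== SOURCE A (Python) =====
-- def semantics_forall_exists(preorder, source, target):
--     """
--     Check if for all formulas in the source set, there exists a formula
--     in the target set that satisfies the given preorder.
--
--     Args:
--         preorder (list of tuple): The preorder defining the preference relation.
--         source (list): List of binary values representing the source formulas.
--         target (list): List of binary values representing the target formulas.
--
--     Returns:
--         bool: True if the semantic condition is satisfied, False otherwise.
--     """
--     sat_source = {i for i in range(len(source)) if source[i] == 1}
--     sat_target = {i for i in range(len(target)) if target[i] == 1}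
--
--     # Force empty set to be indifferent to each other. Required for preference graph to be preorder.
--     if sat_source == sat_target == set():
--         return True
--
--     if sat_target == set():
--         return False
--
--     for alpha_to in sat_target:
--         if len(sat_source) != 0 and not any((alpha_to, alpha_from) in preorder for alpha_from in sat_source):
--             # if len(sat_source) != 0 and not any((alpha_to, alpha_from) in preorder for alpha_from in sat_source - {alpha_to}):
--             return False
--
--     return True
-- ===== SOURCE B (Python) =====
-- def semantics_forall_exists(preorder, source, target):
--     sat_source = {i for i, v in enumerate(source) if v == 1}
--     sat_target = {i for i, v in enumerate(target) if v == 1}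
--     if not sat_target:
--         # empty target: True exactly when source is empty too
--         return not sat_source
--     if not sat_source:
--         # vacuous forall over an empty source
--         return True
--     covered = {to for (to, fr) in preorder if fr in sat_source}
--     return sat_target <= covered
-- ===== Notes on version B (the rewrite author's own statement) =====
-- stated objective: simpler
-- what changed: B builds in one pass over preorder the set of targets covered by some satisfied source and ends with a single subset test, instead of A's nested per-target scan of the preorder; the two empty-set guards are collapsed into one conditional.
import Mathlib
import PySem

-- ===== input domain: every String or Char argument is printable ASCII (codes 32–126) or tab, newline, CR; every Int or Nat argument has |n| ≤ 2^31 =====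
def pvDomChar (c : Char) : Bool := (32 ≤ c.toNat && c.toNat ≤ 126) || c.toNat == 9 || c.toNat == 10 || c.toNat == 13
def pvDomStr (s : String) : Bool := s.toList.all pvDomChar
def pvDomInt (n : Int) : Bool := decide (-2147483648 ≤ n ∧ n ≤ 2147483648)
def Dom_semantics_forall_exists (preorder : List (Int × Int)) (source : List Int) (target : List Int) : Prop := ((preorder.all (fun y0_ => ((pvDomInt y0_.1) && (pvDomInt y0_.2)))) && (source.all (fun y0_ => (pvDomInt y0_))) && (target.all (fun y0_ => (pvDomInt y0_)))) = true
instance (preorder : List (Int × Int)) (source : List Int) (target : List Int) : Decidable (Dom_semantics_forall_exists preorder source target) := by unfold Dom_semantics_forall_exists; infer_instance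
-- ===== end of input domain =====

-- B builds the set of covered targets in one pass over preorder and ends with a subset test, instead of A's nested per-target scan (objective: simpler).


-- ===== PORT A =====
-- {i for i in range(len(xs)) if xs[i] == 1}
def pvSatA (xs : List Int) : PySem.Set Int :=
  PySem.Set.ofList ((PySem.List.pyRange 0 xs.length 1).filter
    (fun i => PySem.List.pyGetD xs i 0 == 1))

def semantics_forall_exists (preorder : List (Int × Int)) (source : List Int) (target : List Int) : Bool :=
  let sat_source := pvSatA source
  let sat_target := pvSatA target
  if PySem.Set.equal sat_source sat_target && PySem.Set.equal sat_target PySem.Set.empty then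
    true
  else if PySem.Set.equal sat_target PySem.Set.empty then
    false
  -- the for-loop with early 'return False' = any over sat_target (result is order-independent)
  else if sat_target.any (fun alpha_to =>
      decide (PySem.Set.len sat_source ≠ 0) &&
      !(sat_source.any (fun alpha_from => preorder.contains (alpha_to, alpha_from)))) then
    false
  else
    true

-- ===== PORT B =====
-- {i for i, v in enumerate(xs) if v == 1}
def pvSatB (xs : List Int) : PySem.Set Int :=
  PySem.Set.ofList (((PySem.List.enumerate xs 0).filter (fun p => p.2 == 1)).map (·.1))

def semantics_forall_exists_alt (preorder : List (Int × Int)) (source : List Int) (target : List Int) : Bool :=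
  let sat_source := pvSatB source
  let sat_target := pvSatB target
  if sat_target.isEmpty then
    sat_source.isEmpty
  else if sat_source.isEmpty then
    true
  else
    let covered := PySem.Set.ofList ((preorder.filter
      (fun p => PySem.Set.contains sat_source p.2)).map (·.1))
    PySem.Set.issubset sat_target covered

-- ===== PRECONDITION & SPEC =====
def Spec_semantics_forall_exists (preorder : List (Int × Int)) (source : List Int) (target : List Int) (out : Bool) : Prop := out = semantics_forall_exists_alt preorder source target
instance (preorder : List (Int × Int)) (source : List Int) (target : List Int) (out : Bool) : Decidable (Spec_semantics_forall_exists preorder source target out) := by unfold Spec_semantics_forall_exists; infer_instance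

-- ===== CLAIM (what is proved, stated in full; the proofs are below) =====
def Claim_equal_semantics_forall_exists : Prop := ∀ (preorder : List (Int × Int)) (source : List Int) (target : List Int), Dom_semantics_forall_exists preorder source target → Spec_semantics_forall_exists preorder source target (semantics_forall_exists preorder source target)

-- ===== LEMMAS AND PROOFS =====
theorem pvSat_eq (xs : List Int) : pvSatA xs = pvSatB xs := by
  unfold pvSatA pvSatB
  rw [PySem.List.enumerate_eq_map_pyRange (d := 0)]
  simp [List.filter_map, List.map_map, Function.comp_def]

theorem equal_empty_iff (s : List Int) :
    (PySem.Set.equal s ([] : List Int) = true) ↔ s = [] := by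
  rw [PySem.Set.equal_iff]
  constructor
  · intro h
    cases s with
    | nil => rfl
    | cons a t => exact absurd ((h a).mp (by simp)) (by simp)
  · rintro rfl
    simp

theorem semantics_main (preorder : List (Int × Int)) (source target : List Int) :
    semantics_forall_exists preorder source target
      = semantics_forall_exists_alt preorder source target := by
  unfold semantics_forall_exists semantics_forall_exists_alt
  rw [← pvSat_eq source, ← pvSat_eq target]
  generalize pvSatA source = S
  generalize pvSatA target = T
  by_cases hT : T = []
  · subst hT
    by_cases hS : S = []
    · subst hS; rfl
    · have h2 : PySem.Set.equal S ([] : List Int) = false :=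
        Bool.eq_false_iff.mpr (fun h => hS ((equal_empty_iff S).mp h))
      simp [PySem.Set.empty, h2, List.isEmpty_iff, hS]
  · have h1 : PySem.Set.equal T ([] : List Int) = false :=
      Bool.eq_false_iff.mpr (fun h => hT ((equal_empty_iff T).mp h))
    by_cases hS : S = []
    · subst hS
      simp [PySem.Set.empty, h1, List.isEmpty_iff, hT, PySem.Set.len]
    · have hlen : decide (PySem.Set.len S ≠ 0) = true := by
        simp [PySem.Set.len, hS]
      simp only [PySem.Set.empty, h1, hlen, Bool.and_false, Bool.false_or, Bool.true_and,
        List.isEmpty_iff, hT, hS, if_false, if_neg]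
      simp [h1, hlen, hT, hS, List.isEmpty_iff]
      rw [Bool.eq_iff_iff]
      simp only [decide_eq_true_eq, Bool.not_eq_true', Bool.eq_false_iff, ne_eq,
        PySem.Set.issubset_iff, PySem.Set.mem_ofList, List.mem_map, List.mem_filter]
      constructor
      · rintro ⟨x, hx, hall⟩ hsub
        obtain ⟨p, ⟨hp, hpS⟩, hpx⟩ := hsub x hx
        exact hall p.2 (by simpa using hpS) (by cases p with | mk a b => simpa [← hpx] using hp)
      · intro hn
        by_contra hno
        push_neg at hno
        apply hn
        intro x hx
        obtain ⟨f, hfS, hfp⟩ := hno x hx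
        exact ⟨(x, f), ⟨⟨hfp, by simpa using hfS⟩, rfl⟩⟩

-- ===== VERDICT (by name: the statement is the Claim_ definition above) =====
theorem semantics_forall_exists_spec : Claim_equal_semantics_forall_exists := by
  intro preorder source target _
  exact semantics_main preorder source target
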